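-- pv_equiv track=rewrite | github.com/alchenerd/neddecker | play/views.py | parse_decklist
-- ===== SOURCE A (Python) =====
-- from typing import List, Dict, Tuple
--
-- def parse_decklist(decklist) -> List[Dict[str, int]]:
--     lines = [entry.strip('\r') for entry in decklist.split('\n')]
--     maindeck, sideboard = {}, {}
--     tofill = maindeck
--     for line in lines:
--         if line == '':
--             tofill = sideboard
--             continue
--         parsed = line.split()
--         count = int(parsed[0])
--         card = ' '.join(parsed[1:])
--         tofill[card] = count
--     return maindeck, sideboard
-- ===== SOURCE B (Python) =====
-- def _parse_block(block):
--     d = {}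
--     for line in block:
--         if line == '':
--             continue
--         parsed = line.split()
--         d[' '.join(parsed[1:])] = int(parsed[0])
--     return d
--
-- def parse_decklist(decklist):
--     lines = [entry.strip('\r') for entry in decklist.split('\n')]
--     if '' in lines:
--         i = lines.index('')
--         main_block, side_block = lines[:i], lines[i + 1:]
--     else:
--         main_block, side_block = lines, []
--     return _parse_block(main_block), _parse_block(side_block)
-- ===== Notes on version B (the rewrite author's own statement) =====
-- stated objective: simpler
-- what changed: Replaces A's stateful current-target pointer loop with a split at the first blank line (index + two slices) and one stateless block-parsing helper applied to each half.
import Mathlib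
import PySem

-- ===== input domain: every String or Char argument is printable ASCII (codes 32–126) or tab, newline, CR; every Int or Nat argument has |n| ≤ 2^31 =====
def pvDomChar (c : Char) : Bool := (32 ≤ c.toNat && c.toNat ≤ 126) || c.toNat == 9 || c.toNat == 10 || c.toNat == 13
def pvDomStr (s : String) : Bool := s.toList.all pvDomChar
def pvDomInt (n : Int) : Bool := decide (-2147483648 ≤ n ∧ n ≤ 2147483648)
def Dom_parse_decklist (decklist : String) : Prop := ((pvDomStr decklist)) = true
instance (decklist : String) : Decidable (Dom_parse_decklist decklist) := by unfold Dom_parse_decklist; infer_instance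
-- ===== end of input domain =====

-- B replaces A's stateful current-target-dict loop with a split at the first blank line
-- and a stateless block-parsing helper applied to each half (objective: simpler).

-- ===== PORT A =====
-- the parsing both Pythons share per line: count = int(parsed[0]); card = ' '.join(parsed[1:])
-- (the .getD defaults stand for Python's IndexError/ValueError; Pre_ excludes those inputs)
def pdEntry (line : String) : String × Int :=
  let parsed := PySem.Str.split₀ line
  let count := (PySem.Int.ofStr? ((PySem.List.pyGet? parsed 0).getD "")).getD 0
  let card := PySem.Str.join " " (PySem.List.slice parsed (some 1) none)
  (card, count)

-- A's loop body: state = (maindeck, sideboard, tofill-is-sideboard flag)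
def pdStepA (st : (PySem.Dict String Int) × (PySem.Dict String Int) × Bool)
    (line : String) : (PySem.Dict String Int) × (PySem.Dict String Int) × Bool :=
  if line == "" then (st.1, st.2.1, true)
  else
    let e := pdEntry line
    if st.2.2 then (st.1, st.2.1.insert e.1 e.2, true)
    else (st.1.insert e.1 e.2, st.2.1, false)

def parse_decklist (decklist : String) : (List (String × Int)) × (List (String × Int)) :=
  let lines := ((PySem.Str.split? decklist "\n").getD []).map
    (fun e => PySem.Str.stripChars e "\r")
  let st := lines.foldl pdStepA (PySem.Dict.empty, PySem.Dict.empty, false)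
  (st.1.items, st.2.1.items)

-- ===== PORT B =====
def pdParseBlock (block : List String) : PySem.Dict String Int :=
  block.foldl (fun d line => if line == "" then d
                             else d.insert (pdEntry line).1 (pdEntry line).2)
    PySem.Dict.empty

def parse_decklist_alt (decklist : String) : (List (String × Int)) × (List (String × Int)) :=
  let lines := ((PySem.Str.split? decklist "\n").getD []).map
    (fun e => PySem.Str.stripChars e "\r")
  match PySem.List.index? lines "" with
  | some i => ((pdParseBlock (PySem.List.slice lines none (some (i : Int)))).items,
               (pdParseBlock (PySem.List.slice lines (some ((i : Int) + 1)) none)).items)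
  | none => ((pdParseBlock lines).items, (pdParseBlock []).items)

-- ===== PRECONDITION & SPEC =====
-- Pre_ excludes exactly the inputs where Python A raises: a non-blank line that is
-- whitespace-only (IndexError on parsed[0]) or whose first token is not int()-parseable (ValueError).
def Pre_parse_decklist (decklist : String) : Prop :=
  ∀ line ∈ ((PySem.Str.split? decklist "\n").getD []).map (fun e => PySem.Str.stripChars e "\r"),
    line ≠ "" →
      PySem.Str.split₀ line ≠ [] ∧
      (PySem.Int.ofStr? ((PySem.Str.split₀ line).headD "")).isSome = true
instance (decklist : String) : Decidable (Pre_parse_decklist decklist) := by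
  unfold Pre_parse_decklist; infer_instance
def pvWitness_parse_decklist : String := "4 Bolt\n2 Duress\n\n1 Veil"
def Spec_parse_decklist (decklist : String) (out : (List (String × Int)) × (List (String × Int))) : Prop := out = parse_decklist_alt decklist
instance (decklist : String) (out : (List (String × Int)) × (List (String × Int))) : Decidable (Spec_parse_decklist decklist out) := by unfold Spec_parse_decklist; infer_instance

-- ===== CLAIM (what is proved, stated in full; the proofs are below) =====
def Claim_equal_parse_decklist : Prop := ∀ (decklist : String), Dom_parse_decklist decklist → Pre_parse_decklist decklist → Spec_parse_decklist decklist (parse_decklist decklist)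

-- ===== LEMMAS AND PROOFS =====

-- B's helper as a fold from an arbitrary dict
def pdBlockFrom (d : PySem.Dict String Int) (block : List String) : PySem.Dict String Int :=
  block.foldl (fun d line => if line == "" then d
                             else d.insert (pdEntry line).1 (pdEntry line).2) d

theorem pdBlockFrom_nil (d : PySem.Dict String Int) : pdBlockFrom d [] = d := rfl

theorem pdBlockFrom_cons (d : PySem.Dict String Int) (l : String) (t : List String) :
    pdBlockFrom d (l :: t) =
      pdBlockFrom (if l == "" then d else d.insert (pdEntry l).1 (pdEntry l).2) t := rfl

theorem pdParseBlock_eq (block : List String) :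
    pdParseBlock block = pdBlockFrom PySem.Dict.empty block := rfl

-- once A's flag is true, the rest of the lines fold into the sideboard only
theorem foldA_side (lines : List String) (m s : PySem.Dict String Int) :
    lines.foldl pdStepA (m, s, true) = (m, pdBlockFrom s lines, true) := by
  induction lines generalizing s with
  | nil => rfl
  | cons l t ih =>
    rw [List.foldl_cons, pdBlockFrom_cons]
    by_cases h : l == ""
    · rw [show pdStepA (m, s, true) l = (m, s, true) from by simp [pdStepA, h], if_pos h]
      exact ih s
    · rw [show pdStepA (m, s, true) l = (m, s.insert (pdEntry l).1 (pdEntry l).2, true) from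
        by simp [pdStepA, h], if_neg h]
      exact ih _

-- with the flag still false, A's fold splits at the first blank line
theorem foldA_main (lines : List String) (m s : PySem.Dict String Int) :
    lines.foldl pdStepA (m, s, false) =
      match PySem.List.index? lines "" with
      | some i => (pdBlockFrom m (lines.take i), pdBlockFrom s (lines.drop (i + 1)), true)
      | none => (pdBlockFrom m lines, s, false) := by
  induction lines generalizing m with
  | nil => rfl
  | cons l t ih =>
    by_cases h : l = ""
    · subst h
      rw [PySem.List.index?_cons_self, List.foldl_cons,
        show pdStepA (m, s, false) "" = (m, s, true) from rfl, foldA_side]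
      simp [pdBlockFrom_nil]
    · have hbe : (l == "") = false := by simp [h]
      rw [PySem.List.index?_cons_of_ne t h, List.foldl_cons,
        show pdStepA (m, s, false) l = (m.insert (pdEntry l).1 (pdEntry l).2, s, false) from
          by simp [pdStepA, hbe], ih]
      cases hidx : PySem.List.index? t "" with
      | some i =>
        simp only [Option.map_some, List.take_succ_cons, List.drop_succ_cons,
          pdBlockFrom_cons, hbe, Bool.false_eq_true, if_false]
      | none =>
        simp only [Option.map_none, pdBlockFrom_cons, hbe, Bool.false_eq_true, if_false]

theorem pd_main_eq (lines : List String) :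
    (let st := lines.foldl pdStepA (PySem.Dict.empty, PySem.Dict.empty, false)
     (st.1.items, st.2.1.items)) =
      match PySem.List.index? lines "" with
      | some i => ((pdParseBlock (PySem.List.slice lines none (some (i : Int)))).items,
                   (pdParseBlock (PySem.List.slice lines (some ((i : Int) + 1)) none)).items)
      | none => ((pdParseBlock lines).items, (pdParseBlock []).items) := by
  rw [foldA_main]
  cases hidx : PySem.List.index? lines "" with
  | some i =>
    simp only [PySem.List.slice_to_natCast, pdParseBlock_eq]
    rw [show ((i : Int) + 1) = ((i + 1 : Nat) : Int) from by push_cast; ring,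
      PySem.List.slice_from_natCast]
  | none =>
    simp only [pdParseBlock_eq, pdBlockFrom_nil]

-- ===== VERDICT (by name: the statement is the Claim_ definition above) =====
theorem parse_decklist_spec : Claim_equal_parse_decklist := by
  intro decklist _ _
  unfold Spec_parse_decklist parse_decklist parse_decklist_alt
  exact pd_main_eq _
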